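-- pv_equiv track=rewrite | github.com/Flavio-Davi/TDS-IFPI | Tarefas - RunCodes/Sem-09/T1-Q1.py | definir
-- ===== SOURCE A (Python) =====
-- def definir(numeros):
--     diferente = 0
--     iguais = 0
--     for numero in numeros:
--         for numeru in numeros:
--             if numero == numeru:
--                 iguais += 1
--             elif numero != numeru:
--                 diferente += 1
--
--     if diferente == 4:
--         return "Existem dois valores iguais e um diferente"
--     elif diferente >= 3:
--         return "Todos os valores são diferentes"
--     elif iguais >= 3:
--         return "Todos os valores são iguais"
-- ===== SOURCE B (Python) =====
-- def definir(numeros):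
--     freq = {}
--     for x in numeros:
--         freq[x] = freq.get(x, 0) + 1
--     iguais = sum(f * f for f in freq.values())
--     diferente = len(numeros) ** 2 - iguais
--
--     if diferente == 4:
--         return "Existem dois valores iguais e um diferente"
--     elif diferente >= 3:
--         return "Todos os valores são diferentes"
--     elif iguais >= 3:
--         return "Todos os valores são iguais"
-- ===== Notes on version B (the rewrite author's own statement) =====
-- stated objective: faster
-- what changed: Replaces the O(n^2) double loop over all ordered pairs by a single-pass frequency map: iguais = sum of squared frequencies, diferente = n^2 - iguais, then the same conditionals.
import Mathlib
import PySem

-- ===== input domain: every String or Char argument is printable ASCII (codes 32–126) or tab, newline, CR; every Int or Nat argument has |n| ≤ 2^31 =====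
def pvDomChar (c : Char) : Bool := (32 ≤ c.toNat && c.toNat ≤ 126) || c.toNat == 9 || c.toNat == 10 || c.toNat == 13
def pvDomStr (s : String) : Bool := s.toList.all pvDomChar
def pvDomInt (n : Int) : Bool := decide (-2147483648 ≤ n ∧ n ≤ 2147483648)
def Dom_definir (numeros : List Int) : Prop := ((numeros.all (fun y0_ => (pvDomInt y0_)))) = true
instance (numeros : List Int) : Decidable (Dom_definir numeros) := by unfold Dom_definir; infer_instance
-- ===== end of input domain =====

-- B replaces A's O(n^2) double loop over ordered pairs by a one-pass frequency map
-- (iguais = sum of squared frequencies, diferente = n^2 - iguais); measured faster (asymptotic).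


-- ===== PORT A =====
def definir (numeros : List Int) : Option String :=
  let st := numeros.foldl (fun (st : Int × Int) numero =>
      numeros.foldl (fun (st2 : Int × Int) numeru =>
        if numero == numeru then (st2.1, st2.2 + 1)
        else if numero != numeru then (st2.1 + 1, st2.2)
        else st2) st) (0, 0)
  let diferente := st.1
  let iguais := st.2
  if diferente == 4 then some "Existem dois valores iguais e um diferente"
  else if diferente ≥ 3 then some "Todos os valores são diferentes"
  else if iguais ≥ 3 then some "Todos os valores são iguais"
  else none

-- ===== PORT B =====
def definir_alt (numeros : List Int) : Option String :=
  let freq := numeros.foldl (fun (d : PySem.Dict Int Int) x => d.insert x (d.getD x 0 + 1)) PySem.Dict.empty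
  let iguais : Int := (freq.values.map (fun f => f * f)).sum
  let diferente : Int := PySem.List.len numeros * PySem.List.len numeros - iguais
  if diferente == 4 then some "Existem dois valores iguais e um diferente"
  else if diferente ≥ 3 then some "Todos os valores são diferentes"
  else if iguais ≥ 3 then some "Todos os valores são iguais"
  else none

-- ===== PRECONDITION & SPEC =====
def Spec_definir (numeros : List Int) (out : Option String) : Prop := out = definir_alt numeros
instance (numeros : List Int) (out : Option String) : Decidable (Spec_definir numeros out) := by unfold Spec_definir; infer_instance

-- ===== CLAIM (what is proved, stated in full; the proofs are below) =====
def Claim_equal_definir : Prop := ∀ (numeros : List Int), Dom_definir numeros → Spec_definir numeros (definir numeros)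

-- ===== LEMMAS AND PROOFS =====

-- A's inner loop over ys for a fixed numero a
lemma inner_loop (ys : List Int) (a : Int) (st : Int × Int) :
    ys.foldl (fun (st2 : Int × Int) numeru =>
        if a == numeru then (st2.1, st2.2 + 1)
        else if a != numeru then (st2.1 + 1, st2.2)
        else st2) st
      = (st.1 + (ys.countP (fun y => y ≠ a) : Int), st.2 + (ys.count a : Int)) := by
  induction ys generalizing st with
  | nil => simp
  | cons y ys ih =>
    rw [List.foldl_cons, ih]
    by_cases h : a = y
    · simp [h]
      ring
    · have h' : ¬ (y = a) := fun hy => h hy.symm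
      simp [h, h', bne_iff_ne]
      ring

-- a fold accumulating two sums componentwise
lemma sum_loop (f g : Int → Int) (l : List Int) (st : Int × Int) :
    l.foldl (fun (st : Int × Int) x => (st.1 + f x, st.2 + g x)) st
      = (st.1 + (l.map f).sum, st.2 + (l.map g).sum) := by
  induction l generalizing st with
  | nil => simp
  | cons x l ih =>
    rw [List.foldl_cons, ih]
    refine Prod.ext ?_ ?_ <;> simp <;> ring

-- A's outer loop
lemma outer_loop (pref full : List Int) (st : Int × Int) :
    pref.foldl (fun (st : Int × Int) numero =>
        full.foldl (fun (st2 : Int × Int) numeru =>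
          if numero == numeru then (st2.1, st2.2 + 1)
          else if numero != numeru then (st2.1 + 1, st2.2)
          else st2) st) st
      = (st.1 + (pref.map (fun x => (full.countP (fun y => y ≠ x) : Int))).sum,
         st.2 + (pref.map (fun x => (full.count x : Int))).sum) := by
  simp only [inner_loop]
  exact sum_loop _ _ pref st

-- B's sum of squared frequencies equals A's Σ_{x∈xs} count x xs
lemma iguais_eq (xs : List Int) :
    ((PySem.Dict.counter xs).values.map (fun f => f * f)).sum
      = (xs.map (fun x => (xs.count x : Int))).sum := by
  have hv : (PySem.Dict.counter xs).values
      = (PySem.Set.ofList xs).map (fun k => (xs.count k : Int)) := by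
    simp only [PySem.Dict.values, PySem.Dict.items_counter, List.map_map]
    rfl
  rw [hv, List.map_map]
  have hnd : (PySem.Set.ofList xs).Nodup := PySem.Set.nodup_ofList xs
  have hfin : (PySem.Set.ofList xs).toFinset = xs.toFinset := by
    ext v; simp [PySem.Set.mem_ofList]
  calc ((PySem.Set.ofList xs).map ((fun f => f * f) ∘ fun k => (xs.count k : Int))).sum
      = ∑ m ∈ (PySem.Set.ofList xs).toFinset, (xs.count m : Int) * (xs.count m : Int) := by
        rw [List.sum_toFinset _ hnd]; rfl
    _ = ∑ m ∈ xs.toFinset, xs.count m • ((xs.count m : Int)) := by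
        rw [hfin]; exact Finset.sum_congr rfl (fun m _ => (nsmul_eq_mul _ _).symm)
    _ = (xs.map (fun x => (xs.count x : Int))).sum := (Finset.sum_list_map_count xs _).symm

-- A's "diferente" sum is n^2 minus the "iguais" sum
lemma diferente_eq (xs : List Int) :
    (xs.map (fun x => (xs.countP (fun y => y ≠ x) : Int))).sum
      = (xs.length : Int) * xs.length - (xs.map (fun x => (xs.count x : Int))).sum := by
  have h : ∀ x : Int, (xs.countP (fun y => y ≠ x) : Int)
      = (xs.length : Int) - (xs.count x : Int) := by
    intro x
    have h1 := List.length_eq_countP_add_countP (l := xs) (p := fun y => y == x)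
    beta_reduce at h1
    have hc : xs.count x = xs.countP (fun y => y == x) := rfl
    have hn : xs.countP (fun y => y ≠ x) = xs.countP (fun a => ¬((a == x) = true)) := by
      apply List.countP_congr; intro a _; simp
    omega
  have hsplit : (xs.map (fun x => (xs.count x : Int) +
        ((xs.length : Int) - (xs.count x : Int)))).sum
      = (xs.map (fun x => (xs.count x : Int))).sum +
        (xs.map (fun x => (xs.length : Int) - (xs.count x : Int))).sum :=
    PySem.List.sum_map_add_int xs _ _
  have hconst : (xs.map (fun x => (xs.count x : Int) +
        ((xs.length : Int) - (xs.count x : Int)))).sum = (xs.length : Int) * xs.length := by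
    have : (fun x => (xs.count x : Int) + ((xs.length : Int) - (xs.count x : Int)))
        = fun _ : Int => (xs.length : Int) := by funext x; ring
    rw [this, PySem.List.sum_map_const_int]
  have hmap : (xs.map (fun x => (xs.countP (fun y => y ≠ x) : Int))).sum
      = (xs.map (fun x => (xs.length : Int) - (xs.count x : Int))).sum := by
    congr 1; exact List.map_congr_left (fun x _ => h x)
  rw [hmap]; omega

-- ===== VERDICT (by name: the statement is the Claim_ definition above) =====
theorem definir_spec : Claim_equal_definir := by
  intro xs _
  unfold Spec_definir definir definir_alt
  rw [PySem.Dict.foldl_insert_getD_add_one_eq_counter]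
  simp only [outer_loop, iguais_eq, diferente_eq, PySem.List.len_eq, zero_add]
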